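-- pv_equiv track=rewrite | github.com/Pavan-gr07/leetcode_prob | July-preparation/monotonicStack.py | monotonic_decreasing_stack
-- ===== SOURCE A (Python) =====
-- def monotonic_decreasing_stack(arr):
--     stack = []
--     result = [] # Or process elements as they are popped
--     for element in arr:
--         while stack and stack[-1] > element: # For decreasing, pop if top is smaller
--             stack.pop() # Process popped elements if needed
--         stack.append(element)
--         # You might add elements to 'result' here based on problem needs
--     return stack # Or return 'result' depending on the problem
-- ===== SOURCE B (Python) =====
-- def monotonic_decreasing_stack(arr):
--     # Right-to-left pass: an element survives A's stack iff it is <= every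
--     # element to its right, i.e. iff it is a suffix minimum.
--     survivors = []
--     cur_min = None
--     for x in reversed(arr):
--         if cur_min is None or x <= cur_min:
--             survivors.append(x)
--             cur_min = x
--     survivors.reverse()
--     return survivors
-- ===== Notes on version B (the rewrite author's own statement) =====
-- stated objective: alternative
-- what changed: Replaces the push/pop stack simulation with a single right-to-left pass that keeps a scalar running suffix-minimum and collects suffix-minimum elements, reversing the collected list at the end.
import Mathlib
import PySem

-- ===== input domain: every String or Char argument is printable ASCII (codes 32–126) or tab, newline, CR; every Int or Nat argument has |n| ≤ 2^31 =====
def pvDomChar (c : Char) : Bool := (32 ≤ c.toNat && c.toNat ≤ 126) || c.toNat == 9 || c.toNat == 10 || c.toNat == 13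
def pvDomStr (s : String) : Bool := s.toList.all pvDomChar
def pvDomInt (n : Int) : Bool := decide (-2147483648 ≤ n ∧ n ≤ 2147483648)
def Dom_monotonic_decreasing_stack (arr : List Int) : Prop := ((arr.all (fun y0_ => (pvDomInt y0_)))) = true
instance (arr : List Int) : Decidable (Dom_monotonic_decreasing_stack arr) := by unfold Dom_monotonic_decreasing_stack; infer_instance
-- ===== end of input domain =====

-- B replaces the push/pop stack simulation by a right-to-left pass keeping a running
-- suffix minimum (alternative decomposition, same O(n) cost; return value only).


-- ===== PORT A =====
-- the inner `while stack and stack[-1] > element: stack.pop()` loop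
def popLoop (stack : List Int) (element : Int) : List Int :=
  match h : stack.getLast? with
  | some top =>
      if top > element then popLoop stack.dropLast element else stack
  | none => stack
termination_by stack.length
decreasing_by
  have : stack ≠ [] := by intro hn; subst hn; simp at h
  have hpos : 0 < stack.length := List.length_pos_iff.mpr this
  simp [List.length_dropLast]; omega

def monotonic_decreasing_stack (arr : List Int) : List Int :=
  arr.foldl (fun stack element => popLoop stack element ++ [element]) []

-- ===== PORT B =====
-- state: (survivors so far, current suffix minimum)
def stepB (st : List Int × Option Int) (x : Int) : List Int × Option Int :=
  match st.2 with
  | none => (st.1 ++ [x], some x)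
  | some m => if x ≤ m then (st.1 ++ [x], some x) else st

def monotonic_decreasing_stack_alt (arr : List Int) : List Int :=
  (arr.reverse.foldl stepB ([], none)).1.reverse

-- ===== PRECONDITION & SPEC =====
def Spec_monotonic_decreasing_stack (arr : List Int) (out : List Int) : Prop := out = monotonic_decreasing_stack_alt arr
instance (arr : List Int) (out : List Int) : Decidable (Spec_monotonic_decreasing_stack arr out) := by unfold Spec_monotonic_decreasing_stack; infer_instance

-- ===== CLAIM (what is proved, stated in full; the proofs are below) =====
def Claim_equal_monotonic_decreasing_stack : Prop := ∀ (arr : List Int), Dom_monotonic_decreasing_stack arr → Spec_monotonic_decreasing_stack arr (monotonic_decreasing_stack arr)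

-- ===== LEMMAS AND PROOFS =====

-- common characterisation: keep x iff x ≤ every element to its right
def survF : List Int → List Int
  | [] => []
  | x :: xs => if ∀ y ∈ xs, x ≤ y then x :: survF xs else survF xs

lemma popLoop_append (s : List Int) (a x : Int) :
    popLoop (s ++ [a]) x = if x < a then popLoop s x else s ++ [a] := by
  rw [popLoop]
  split
  · rename_i top h
    have htop : top = a := by
      have := List.getLast?_concat (l := s) (a := a)
      rw [this] at h
      exact (Option.some_inj.mp h).symm
    subst htop
    simp [List.dropLast_concat, gt_iff_lt]
  · rename_i h
    exfalso
    rw [List.getLast?_concat] at h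
    simp at h

lemma popLoop_all_le (x : Int) : ∀ s : List Int, (∀ b ∈ s, b ≤ x) → popLoop s x = s := by
  intro s
  induction s using List.reverseRecOn with
  | nil => intro _; rw [popLoop]; simp
  | append_singleton s a ih =>
      intro h
      rw [popLoop_append]
      have hle : ¬ x < a := by
        have := h a (by simp)
        omega
      simp [hle]

lemma popLoop_drop_gt (x : Int) : ∀ r s : List Int, (∀ b ∈ r, x < b) →
    popLoop (s ++ r) x = popLoop s x := by
  intro r
  induction r using List.reverseRecOn with
  | nil => intro s _; simp
  | append_singleton r a ih =>
      intro s h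
      have ha : x < a := h a (by simp)
      rw [← List.append_assoc, popLoop_append]
      simp only [if_pos ha]
      exact ih s (fun b hb => h b (by simp [hb]))

lemma dropWhile_gt (x : Int) : ∀ t : List Int, List.Pairwise (· ≤ ·) t →
    ∀ a ∈ t.dropWhile (fun b => decide (b ≤ x)), x < a := by
  intro t
  induction t with
  | nil => simp
  | cons h t ih =>
      intro hp a ha
      rcases List.pairwise_cons.mp hp with ⟨hph, hpt⟩
      by_cases hx : h ≤ x
      · simp [List.dropWhile, hx] at ha
        exact ih hpt a ha
      · simp [List.dropWhile, hx] at ha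
        rcases ha with rfl | ha
        · omega
        · have := hph a ha
          omega

lemma A_loop : ∀ (xs s t : List Int),
    (∀ a ∈ s, ∀ y ∈ xs, a ≤ y) →
    List.Pairwise (· ≤ ·) t →
    (∀ a ∈ t, ∃ y ∈ xs, y < a) →
    xs.foldl (fun stack element => popLoop stack element ++ [element]) (s ++ t) = s ++ survF xs := by
  intro xs
  induction xs with
  | nil =>
      intro s t _ _ hd
      have ht : t = [] := by
        cases t with
        | nil => rfl
        | cons a t => rcases hd a (by simp) with ⟨y, hy, _⟩; simp at hy
      simp [ht, survF]
  | cons x xs ih =>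
      intro s t hs hp hd
      have hsx : ∀ b ∈ s, b ≤ x := fun b hb => hs b hb x (by simp)
      -- split t into the part ≤ x and the part > x
      set t1 := t.takeWhile (fun b => decide (b ≤ x)) with ht1
      set t2 := t.dropWhile (fun b => decide (b ≤ x)) with ht2
      have htsplit : t1 ++ t2 = t := List.takeWhile_append_dropWhile
      have ht1le : ∀ b ∈ t1, b ≤ x := by
        intro b hb
        have := List.mem_takeWhile_imp hb
        simpa using this
      have ht2gt : ∀ b ∈ t2, x < b := dropWhile_gt x t hp
      have hpop : popLoop (s ++ t) x = s ++ t1 := by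
        rw [← htsplit, ← List.append_assoc, popLoop_drop_gt x t2 _ ht2gt]
        exact popLoop_all_le x (s ++ t1) (by
          intro b hb
          rcases List.mem_append.mp hb with h | h
          · exact hsx b h
          · exact ht1le b h)
      have ht1sub : ∀ a ∈ t1, a ∈ t := by
        intro a ha; rw [← htsplit]; exact List.mem_append_left _ ha
      simp only [List.foldl_cons, hpop]
      by_cases hall : ∀ y ∈ xs, x ≤ y
      · -- x is a suffix minimum: t1 must be empty
        have ht1nil : t1 = [] := by
          cases h1 : t1 with
          | nil => rfl
          | cons a t1' =>
              exfalso
              have ha1 : a ∈ t1 := by rw [h1]; simp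
              rcases hd a (ht1sub a ha1) with ⟨y, hy, hlt⟩
              have hax : a ≤ x := ht1le a ha1
              rcases List.mem_cons.mp hy with rfl | hy'
              · omega
              · have := hall y hy'; omega
        rw [ht1nil, List.append_nil]
        have := ih (s ++ [x]) []
          (by intro a ha y hy
              rcases List.mem_append.mp ha with h | h
              · exact hs a h y (by simp [hy])
              · simp at h; subst h; exact hall y hy)
          (by simp) (by simp)
        have hsur : survF (x :: xs) = x :: survF xs := by rw [survF, if_pos hall]
        rw [hsur]
        simpa [List.append_assoc] using this
      · -- some later element is smaller than x
        push_neg at hall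
        rcases hall with ⟨y0, hy0, hy0lt⟩
        rw [List.append_assoc]
        have := ih s (t1 ++ [x])
          (by intro a ha y hy; exact hs a ha y (by simp [hy]))
          (by
            rw [List.pairwise_append]
            refine ⟨?_, by simp, ?_⟩
            · exact hp.sublist (htsplit ▸ (List.sublist_append_left t1 t2))
            · intro a ha b hb; simp at hb; subst hb; exact ht1le a ha)
          (by
            intro a ha
            rcases List.mem_append.mp ha with h | h
            · rcases hd a (ht1sub a h) with ⟨y, hy, hlt⟩
              rcases List.mem_cons.mp hy with rfl | hy'
              · exact absurd (ht1le a h) (by omega)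
              · exact ⟨y, hy', hlt⟩
            · simp at h; subst h; exact ⟨y0, hy0, by omega⟩)
        rw [this]
        have hnall : ¬ ∀ y ∈ xs, x ≤ y := by push_neg; exact ⟨y0, hy0, hy0lt⟩
        simp [survF, hnall]

lemma B_loop : ∀ xs : List Int,
    (xs.reverse.foldl stepB ([], none)).1.reverse = survF xs ∧
    (∀ m, (xs.reverse.foldl stepB ([], none)).2 = some m → m ∈ xs ∧ ∀ y ∈ xs, m ≤ y) ∧
    ((xs.reverse.foldl stepB ([], none)).2 = none → xs = []) := by
  intro xs
  induction xs with
  | nil => simp [survF]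
  | cons x xs ih =>
      obtain ⟨ih1, ih2, ih3⟩ := ih
      rw [List.reverse_cons, List.foldl_append]
      set st := xs.reverse.foldl stepB (([] : List Int), (none : Option Int)) with hst
      cases hc : st.2 with
      | none =>
          have hxs : xs = [] := ih3 hc
          subst hxs
          have hsv : st.1 = [] := by simpa using ih1
          refine ⟨?_, ?_, ?_⟩
          · simp [List.foldl, stepB, hc, hsv, survF]
          · intro m hm
            simp [List.foldl, stepB, hc] at hm
            subst hm; simp
          · simp [List.foldl, stepB, hc]
      | some m =>
          obtain ⟨hmem, hmin⟩ := ih2 m hc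
          by_cases hxm : x ≤ m
          · have hall : ∀ y ∈ xs, x ≤ y := fun y hy => le_trans hxm (hmin y hy)
            refine ⟨?_, ?_, ?_⟩
            · simp [List.foldl, stepB, hc, hxm, survF, ih1]
              exact hall
            · intro m' hm'
              simp [List.foldl, stepB, hc, hxm] at hm'
              subst hm'
              exact ⟨by simp, by intro y hy; rcases List.mem_cons.mp hy with rfl | h; omega; exact hall y h⟩
            · simp [List.foldl, stepB, hc, hxm]
          · have hnall : ¬ ∀ y ∈ xs, x ≤ y := by
              push_neg; exact ⟨m, hmem, by omega⟩
            refine ⟨?_, ?_, ?_⟩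
            · simp [List.foldl, stepB, hc, hxm, survF, hnall, ih1]
            · intro m' hm'
              simp [List.foldl, stepB, hc, hxm] at hm'
              subst hm'
              exact ⟨by simp [hmem], by intro y hy; rcases List.mem_cons.mp hy with rfl | h; omega; exact hmin y h⟩
            · simp [List.foldl, stepB, hc, hxm]

-- ===== VERDICT (by name: the statement is the Claim_ definition above) =====
theorem monotonic_decreasing_stack_spec : Claim_equal_monotonic_decreasing_stack := by
  intro arr _
  unfold Spec_monotonic_decreasing_stack monotonic_decreasing_stack monotonic_decreasing_stack_alt
  have hA := A_loop arr [] [] (by simp) (by simp) (by simp)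
  simp only [List.nil_append] at hA
  rw [hA, (B_loop arr).1]
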